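-- pv_equiv track=rewrite | github.com/jdaltonll02/medicalrag_synergy14 | scripts/run_hybrid_pipeline.py | _keyword_filter
-- ===== SOURCE A (Python) =====
-- from typing import Dict, List, Any, Iterator
--
-- _STOPWORDS = {
--     "a", "an", "the", "is", "are", "was", "were", "be", "been", "being",
--     "have", "has", "had", "do", "does", "did", "will", "would", "could",
--     "should", "may", "might", "can", "to", "of", "in", "for", "on",
--     "with", "at", "by", "from", "as", "into", "or", "and", "that", "this",
--     "it", "its", "not", "no", "but", "if", "what", "which", "who", "how",
--     "when", "where", "why", "their", "they", "them", "we", "our", "your",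
--     "after", "about", "between", "through", "during", "before", "than",
-- }
--
-- def _keyword_filter(
--     query: str,
--     docs: List[Dict[str, Any]],
--     min_passing: int = 5,
-- ) -> List[Dict[str, Any]]:
--     """Return docs reordered so keyword-matching docs come first."""
--     terms = [
--         w.lower().strip(".,?!()[]") for w in query.split()
--         if len(w) > 3 and w.lower() not in _STOPWORDS
--     ]
--     if not terms:
--         return docs
--
--     passing, failing = [], []
--     for doc in docs:
--         text = ((doc.get("title") or "") + " " + (doc.get("abstract") or "")).lower()
--         if any(t in text for t in terms):
--             passing.append(doc)
--         else:
--             failing.append(doc)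
--
--     # Always return at least min_passing docs to avoid starving the answer
--     if len(passing) < min_passing:
--         passing = passing + failing[: min_passing - len(passing)]
--         failing = failing[max(0, min_passing - len(passing)):]
--
--     return passing + failing
-- ===== SOURCE B (Python) =====
-- from typing import Dict, List, Any
--
-- # Only stopwords longer than 3 characters can ever be hit: the length test
-- # already rejects the short ones, so B keeps just these.
-- _LONG_STOPWORDS = frozenset([
--     "were", "been", "being", "have", "does", "will",
--     "would", "could", "should", "might", "with", "from",
--     "into", "that", "this", "what", "which", "when",
--     "where", "their", "they", "them", "your", "after",
--     "about", "between", "through", "during", "before", "than",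
-- ])
--
--
-- def _hits(terms, doc):
--     text = (doc.get("title") or "").lower() + " " + (doc.get("abstract") or "").lower()
--     for t in terms:
--         if t in text:
--             return True
--     return False
--
--
-- def _keyword_filter(
--     query: str,
--     docs: List[Dict[str, Any]],
--     min_passing: int = 5,
-- ) -> List[Dict[str, Any]]:
--     """Return docs reordered so keyword-matching docs come first (stable)."""
--     terms = []
--     for w in query.split():
--         lw = w.lower()
--         if len(lw) > 3 and lw not in _LONG_STOPWORDS:
--             terms.append(lw.strip(".,?!()[]"))
--     if not terms:
--         return docs
--
--     # Two staged filter passes: every doc is returned exactly once,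
--     # matching docs first, so no top-up/slicing block is needed.
--     return [d for d in docs if _hits(terms, d)] + [d for d in docs if not _hits(terms, d)]
-- ===== Notes on version B (the rewrite author's own statement) =====
-- stated objective: simpler
-- what changed: Replaces A's single two-accumulator partition loop plus its slice-based top-up block with an explicit term-building loop over a reduced stopword set (only words longer than 3 characters can ever be rejected) and two staged filter passes that return every doc exactly once, matching docs first; the top-up block disappears entirely.
-- intended difference: When the query has terms, fewer than min_passing docs match and more than half of (min_passing - matches) docs fail, A's top-up re-appends failing docs it already returned (its second slice re-reads len(passing) after passing was extended), returning duplicated docs; B returns every doc exactly once (matching first), which is the intended top-up behaviour. — e.g. on _keyword_filter("seizure", [[("title", "a")]], 1): A returns [[("title", "a")], [("title", "a")]], B returns [[("title", "a")]]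
import Mathlib
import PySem

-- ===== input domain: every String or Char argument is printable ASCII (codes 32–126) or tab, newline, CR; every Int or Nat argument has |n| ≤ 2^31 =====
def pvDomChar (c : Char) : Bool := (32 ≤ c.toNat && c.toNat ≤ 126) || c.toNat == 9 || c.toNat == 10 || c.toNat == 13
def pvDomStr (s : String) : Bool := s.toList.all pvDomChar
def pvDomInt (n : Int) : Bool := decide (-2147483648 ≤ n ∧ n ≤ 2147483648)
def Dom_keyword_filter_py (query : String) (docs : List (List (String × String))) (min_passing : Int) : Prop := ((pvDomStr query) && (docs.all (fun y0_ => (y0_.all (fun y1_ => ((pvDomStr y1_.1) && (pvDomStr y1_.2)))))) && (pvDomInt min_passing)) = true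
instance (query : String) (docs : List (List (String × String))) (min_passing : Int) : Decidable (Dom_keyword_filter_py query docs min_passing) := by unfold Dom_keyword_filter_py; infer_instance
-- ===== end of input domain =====

-- B replaces A's two-accumulator partition loop plus its slice-based "top-up" block by a term
-- loop over a reduced stopword set and two staged filter passes (objective: simpler); return
-- value only, no argument is mutated by either version.

-- ===== PORT A =====
def pvStopwords : List (List Char) := ["a".toList, "an".toList, "the".toList, "is".toList, "are".toList, "was".toList, "were".toList, "be".toList, "been".toList, "being".toList, "have".toList, "has".toList, "had".toList, "do".toList, "does".toList, "did".toList, "will".toList, "would".toList, "could".toList, "should".toList, "may".toList, "might".toList, "can".toList, "to".toList, "of".toList, "in".toList, "for".toList, "on".toList, "with".toList, "at".toList, "by".toList, "from".toList, "as".toList, "into".toList, "or".toList, "and".toList, "that".toList, "this".toList, "it".toList, "its".toList, "not".toList, "no".toList, "but".toList, "if".toList, "what".toList, "which".toList, "who".toList, "how".toList, "when".toList, "where".toList, "why".toList, "their".toList, "they".toList, "them".toList, "we".toList, "our".toList, "your".toList, "after".toList, "about".toList, "between".toList, "through".toList, "during".toList, "before".toList, "than".toList]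

-- terms = [w.lower().strip(".,?!()[]") for w in query.split() if len(w) > 3 and w.lower() not in _STOPWORDS]
def pvTerms (query : String) : List (List Char) :=
  ((PySem.Chars.split₀ query.toList).filter
      (fun w => decide (3 < w.length) && !(pvStopwords.contains (PySem.Chars.lower w)))).map
    (fun w => PySem.Chars.stripChars (PySem.Chars.lower w) ".,?!()[]".toList)

-- text = ((doc.get("title") or "") + " " + (doc.get("abstract") or "")).lower()
def pvText (doc : List (String × String)) : List Char :=
  PySem.Chars.lower (((List.lookup "title" doc).getD "").toList ++ ' ' :: ((List.lookup "abstract" doc).getD "").toList)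

-- The "top-up" block of A: if len(passing) < min_passing, passing += failing[:min_passing-len(passing)]
-- and failing = failing[max(0, min_passing - len(passing)):] where len(passing) is re-read AFTER the
-- extension (Python's reassignment), so the second bound repeats the extended-passing expression.
def pvTopUp (pf : List (List (String × String)) × List (List (String × String))) (min_passing : Int) :
    List (List (String × String)) × List (List (String × String)) :=
  if PySem.List.len pf.1 < min_passing then
    (pf.1 ++ PySem.List.slice pf.2 none (some (min_passing - PySem.List.len pf.1)),
     PySem.List.slice pf.2
       (some (max 0 (min_passing -
         PySem.List.len (pf.1 ++ PySem.List.slice pf.2 none (some (min_passing - PySem.List.len pf.1)))))) none)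
  else pf

-- return passing + failing
def pvCat (pf : List (List (String × String)) × List (List (String × String))) :
    List (List (String × String)) := pf.1 ++ pf.2

def keyword_filter_py (query : String) (docs : List (List (String × String))) (min_passing : Int) : List (List (String × String)) :=
  if (pvTerms query).isEmpty then docs else
  pvCat (pvTopUp
    (docs.foldl
      (fun (pf : List (List (String × String)) × List (List (String × String))) doc =>
        if (pvTerms query).any (fun t => PySem.Chars.isIn t (pvText doc)) then (pf.1 ++ [doc], pf.2)
        else (pf.1, pf.2 ++ [doc]))
      ([], []))
    min_passing)

-- ===== PORT B =====
-- B's reduced stopword set: only stopwords longer than 3 characters (the length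
-- test already rejects the short ones); a Python frozenset, membership only.
def pvLongStop : List (List Char) := ["were".toList, "been".toList, "being".toList, "have".toList, "does".toList, "will".toList, "would".toList, "could".toList, "should".toList, "might".toList, "with".toList, "from".toList, "into".toList, "that".toList, "this".toList, "what".toList, "which".toList, "when".toList, "where".toList, "their".toList, "they".toList, "them".toList, "your".toList, "after".toList, "about".toList, "between".toList, "through".toList, "during".toList, "before".toList, "than".toList]

-- B's explicit term-building loop:
--   for w in query.split(): lw = w.lower(); if len(lw) > 3 and lw not in _LONG_STOPWORDS: terms.append(lw.strip(...))
def pvTermsB (query : String) : List (List Char) :=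
  (PySem.Chars.split₀ query.toList).foldl
    (fun acc w =>
      if decide (3 < (PySem.Chars.lower w).length) && !(pvLongStop.contains (PySem.Chars.lower w))
      then acc ++ [PySem.Chars.stripChars (PySem.Chars.lower w) ".,?!()[]".toList]
      else acc)
    []

-- text = (doc.get("title") or "").lower() + " " + (doc.get("abstract") or "").lower()
def pvTextB (doc : List (String × String)) : List Char :=
  PySem.Chars.lower ((List.lookup "title" doc).getD "").toList
    ++ ' ' :: PySem.Chars.lower ((List.lookup "abstract" doc).getD "").toList

-- _hits: for t in terms: if t in text: return True / return False
def pvHitsLoop (terms : List (List Char)) (text : List Char) : Bool :=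
  match terms with
  | [] => false
  | t :: ts => if PySem.Chars.isIn t text then true else pvHitsLoop ts text

def pvHitsB (terms : List (List Char)) (doc : List (String × String)) : Bool :=
  pvHitsLoop terms (pvTextB doc)

def keyword_filter_py_alt (query : String) (docs : List (List (String × String))) (min_passing : Int) : List (List (String × String)) :=
  if (pvTermsB query).isEmpty then docs
  else docs.filter (fun d => pvHitsB (pvTermsB query) d)
       ++ docs.filter (fun d => !pvHitsB (pvTermsB query) d)

-- ===== PRECONDITION & SPEC =====
-- When some query term matches fewer than min_passing docs but more than (min_passing - matches)/2
-- docs fail, A's top-up block re-appends already-returned failing docs (its second slice re-reads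
-- len(passing) after passing was extended), returning duplicated docs; B returns every doc exactly
-- once, matching docs first, which is the intended "reorder, top-up from failing" result.
-- (Stated with A's own parsing helpers pvTerms/pvText only.)
def D_keyword_filter_py (query : String) (docs : List (List (String × String))) (min_passing : Int) : Prop :=
  pvTerms query ≠ [] ∧
  ((docs.countP (fun d => (pvTerms query).any (fun t => PySem.Chars.isIn t (pvText d))) : Int) < min_passing ∧
   min_passing - (docs.countP (fun d => (pvTerms query).any (fun t => PySem.Chars.isIn t (pvText d))) : Int)
     < 2 * ((docs.length : Int) - (docs.countP (fun d => (pvTerms query).any (fun t => PySem.Chars.isIn t (pvText d))) : Int)))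
instance (query : String) (docs : List (List (String × String))) (min_passing : Int) : Decidable (D_keyword_filter_py query docs min_passing) := by unfold D_keyword_filter_py; infer_instance

def Spec_keyword_filter_py (query : String) (docs : List (List (String × String))) (min_passing : Int) (out : List (List (String × String))) : Prop := ¬ D_keyword_filter_py query docs min_passing → out = keyword_filter_py_alt query docs min_passing
instance (query : String) (docs : List (List (String × String))) (min_passing : Int) (out : List (List (String × String))) : Decidable (Spec_keyword_filter_py query docs min_passing out) := by unfold Spec_keyword_filter_py; infer_instance

def pvDiffWitness_keyword_filter_py : String × (List (List (String × String))) × Int :=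
  ("seizure", [[("title", "a")]], 1)
def pvDiffWitnessOut_keyword_filter_py : (List (List (String × String))) × (List (List (String × String))) :=
  ([[("title", "a")], [("title", "a")]], [[("title", "a")]])

-- ===== CLAIM (what is proved, stated in full; the proofs are below) =====
def Claim_unchanged_keyword_filter_py : Prop := ∀ (query : String) (docs : List (List (String × String))) (min_passing : Int), Dom_keyword_filter_py query docs min_passing → Spec_keyword_filter_py query docs min_passing (keyword_filter_py query docs min_passing)
def Claim_changed_keyword_filter_py : Prop := Dom_keyword_filter_py (pvDiffWitness_keyword_filter_py.1) (pvDiffWitness_keyword_filter_py.2.1) (pvDiffWitness_keyword_filter_py.2.2) ∧ D_keyword_filter_py (pvDiffWitness_keyword_filter_py.1) (pvDiffWitness_keyword_filter_py.2.1) (pvDiffWitness_keyword_filter_py.2.2) ∧ keyword_filter_py (pvDiffWitness_keyword_filter_py.1) (pvDiffWitness_keyword_filter_py.2.1) (pvDiffWitness_keyword_filter_py.2.2) = pvDiffWitnessOut_keyword_filter_py.1 ∧ keyword_filter_py_alt (pvDiffWitness_keyword_filter_py.1) (pvDiffWitness_keyword_filter_py.2.1) (pvDiffWitness_keyword_filter_py.2.2)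 = pvDiffWitnessOut_keyword_filter_py.2 ∧ pvDiffWitnessOut_keyword_filter_py.1 ≠ pvDiffWitnessOut_keyword_filter_py.2
def Claim_exact_keyword_filter_py : Prop := ∀ (query : String) (docs : List (List (String × String))) (min_passing : Int), Dom_keyword_filter_py query docs min_passing → D_keyword_filter_py query docs min_passing → keyword_filter_py query docs min_passing ≠ keyword_filter_py_alt query docs min_passing

-- ===== LEMMAS AND PROOFS =====

-- B's reduced stopword list is exactly the long part of A's
theorem pv_longstop_eq : pvLongStop = pvStopwords.filter (fun w => decide (3 < w.length)) := by
  decide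

theorem pv_contains_long (v : List Char) (h : 3 < v.length) :
    pvLongStop.contains v = pvStopwords.contains v := by
  rw [pv_longstop_eq, Bool.eq_iff_iff]
  simp [List.mem_filter, h]

-- the two term-loop tests agree on every word
theorem pv_test_eq (w : List Char) :
    (decide (3 < (PySem.Chars.lower w).length) && !(pvLongStop.contains (PySem.Chars.lower w)))
      = (decide (3 < w.length) && !(pvStopwords.contains (PySem.Chars.lower w))) := by
  have hl : (PySem.Chars.lower w).length = w.length := by simp [PySem.Chars.lower]
  by_cases h : 3 < w.length
  · rw [hl, pv_contains_long _ (hl ▸ (hl ▸ h))]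
  · simp [hl, h]

theorem pv_terms_eq (query : String) : pvTermsB query = pvTerms query := by
  unfold pvTermsB pvTerms
  rw [PySem.List.foldl_append_if]
  simp only [List.nil_append]
  congr 1
  apply List.filter_congr
  intro w _
  exact pv_test_eq w

theorem pv_hitsLoop_eq (terms : List (List Char)) (text : List Char) :
    pvHitsLoop terms text = terms.any (fun t => PySem.Chars.isIn t text) := by
  induction terms with
  | nil => rfl
  | cons t ts ih => cases h : PySem.Chars.isIn t text <;> simp [pvHitsLoop, h, ih]

theorem pv_text_eq (d : List (String × String)) : pvTextB d = pvText d := by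
  unfold pvTextB pvText
  simp [PySem.Chars.lower]
  decide

theorem pv_hits_eq (query : String) (d : List (String × String)) :
    pvHitsB (pvTerms query) d = (pvTerms query).any (fun t => PySem.Chars.isIn t (pvText d)) := by
  rw [pvHitsB, pv_hitsLoop_eq, pv_text_eq]

theorem pv_filter_len {α : Type} (l : List α) (p : α → Bool) :
    (l.filter p).length + (l.filter (fun x => !p x)).length = l.length := by
  induction l with
  | nil => rfl
  | cons x xs ih => cases h : p x <;> simp [h, ← ih] <;> omega

-- A's two-accumulator loop is the (passing, failing) partition
theorem pv_part {α : Type} (p : α → Bool) (xs : List α) (acc1 acc2 : List α) :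
    xs.foldl (fun (pf : List α × List α) doc =>
        if p doc then (pf.1 ++ [doc], pf.2) else (pf.1, pf.2 ++ [doc])) (acc1, acc2)
    = (acc1 ++ xs.filter p, acc2 ++ xs.filter (fun d => !p d)) := by
  induction xs generalizing acc1 acc2 with
  | nil => simp
  | cons x xs ih =>
    rw [List.foldl_cons]
    cases h : p x
    · simp only [Bool.false_eq_true, if_false]
      rw [ih]
      simp [h, List.append_assoc]
    · rw [if_pos rfl, ih]
      simp [h, List.append_assoc]

theorem keyword_filter_py_spec : Claim_unchanged_keyword_filter_py := by
  intro query docs mp _hdom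
  unfold Spec_keyword_filter_py
  intro hnd
  unfold keyword_filter_py keyword_filter_py_alt
  rw [pv_terms_eq]
  cases ht : (pvTerms query).isEmpty
  · simp only [Bool.false_eq_true, if_false]
    have hterms : pvTerms query ≠ [] := fun h => by simp [h] at ht
    set p : List (String × String) → Bool :=
      fun d => (pvTerms query).any (fun t => PySem.Chars.isIn t (pvText d)) with hp
    simp only [pv_hits_eq]
    rw [pv_part]
    set P := docs.filter p with hP
    set F := docs.filter (fun d => !p d) with hF
    have hlen : P.length + F.length = docs.length := pv_filter_len docs p
    simp only [pvCat, pvTopUp, List.nil_append]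
    by_cases hlt : (P.length : Int) < mp
    · have hcnt : docs.countP p = P.length := List.countP_eq_length_filter ..
      have hf2 : 2 * (F.length : Int) ≤ mp - P.length := by
        unfold D_keyword_filter_py at hnd
        push_neg at hnd
        have := hnd hterms (by rw [← hp, hcnt]; exact hlt)
        rw [← hp, hcnt] at this
        omega
      simp only [PySem.List.len_eq, if_pos hlt]
      rw [PySem.List.slice_to _ (by omega)]
      rw [List.take_of_length_le (by omega)]
      rw [PySem.List.slice_from _ (le_max_left 0 _)]
      rw [List.drop_eq_nil_of_le (by simp; omega)]
      simp
    · simp only [PySem.List.len_eq, if_neg hlt]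
  · simp

theorem keyword_filter_py_tight : Claim_exact_keyword_filter_py := by
  intro query docs mp _hdom hd
  obtain ⟨hterms, hm, h2f⟩ := hd
  unfold keyword_filter_py keyword_filter_py_alt
  rw [pv_terms_eq]
  have ht : (pvTerms query).isEmpty = false := by
    cases h : (pvTerms query).isEmpty
    · rfl
    · exact absurd (List.isEmpty_iff.mp h) hterms
  simp only [ht, Bool.false_eq_true, if_false]
  set p : List (String × String) → Bool :=
    fun d => (pvTerms query).any (fun t => PySem.Chars.isIn t (pvText d)) with hp
  simp only [pv_hits_eq]
  rw [pv_part]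
  set P := docs.filter p with hP
  set F := docs.filter (fun d => !p d) with hF
  have hcnt : docs.countP p = P.length := List.countP_eq_length_filter ..
  rw [hcnt] at hm h2f
  have hlen : P.length + F.length = docs.length := pv_filter_len docs p
  simp only [pvCat, pvTopUp, List.nil_append]
  have hlt : (P.length : Int) < mp := by omega
  simp only [PySem.List.len_eq, if_pos hlt]
  rw [PySem.List.slice_to _ (by omega)]
  rw [PySem.List.slice_from _ (le_max_left 0 _)]
  intro heq
  have hlen2 := congrArg List.length heq
  simp only [List.length_append, List.length_take, List.length_drop] at hlen2
  omega

-- ===== VERDICT =====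
theorem keyword_filter_py_changed : Claim_changed_keyword_filter_py := by
  unfold Claim_changed_keyword_filter_py; decide
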